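-- pv_equiv track=rewrite | github.com/j-bennet/wharfee | scripts/optionizer.py | tokenize_usage
-- ===== SOURCE A (Python) =====
-- def tokenize_usage(command, usage_str):
--     """
--     Split usage string into groups of arguments.
--     :param command: str
--     :param usage_str: str
--     :return: list
--     """
--     i_command_end = usage_str.find(command)
--     arg_str = usage_str[i_command_end + len(command) + 1:]
--     tokens = arg_str.split()
--     for i, token in enumerate(tokens):
--         if token == '|':
--             # next token is an OR of previous one. Skip it.
--             if i < len(tokens) - 1:
--                 tokens[i + 1] = '|'
--     return [t for t in tokens if t != '|']
-- ===== SOURCE B (Python) =====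
-- def tokenize_usage(command, usage_str):
--     """
--     Split usage string into groups of arguments.
--     :param command: str
--     :param usage_str: str
--     :return: list
--     """
--     i_command_end = usage_str.find(command)
--     arg_str = usage_str[i_command_end + len(command) + 1:]
--     result = []
--     for token in arg_str.split():
--         if token == '|':
--             break
--         result.append(token)
--     return result
-- ===== Notes on version B (the rewrite author's own statement) =====
-- stated objective: simpler
-- what changed: A's mark-then-filter pass (cascading '|' markers forward through the token list, then filtering them out) is replaced by a single early-terminating scan that collects tokens up to the first '|'.
import Mathlib
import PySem

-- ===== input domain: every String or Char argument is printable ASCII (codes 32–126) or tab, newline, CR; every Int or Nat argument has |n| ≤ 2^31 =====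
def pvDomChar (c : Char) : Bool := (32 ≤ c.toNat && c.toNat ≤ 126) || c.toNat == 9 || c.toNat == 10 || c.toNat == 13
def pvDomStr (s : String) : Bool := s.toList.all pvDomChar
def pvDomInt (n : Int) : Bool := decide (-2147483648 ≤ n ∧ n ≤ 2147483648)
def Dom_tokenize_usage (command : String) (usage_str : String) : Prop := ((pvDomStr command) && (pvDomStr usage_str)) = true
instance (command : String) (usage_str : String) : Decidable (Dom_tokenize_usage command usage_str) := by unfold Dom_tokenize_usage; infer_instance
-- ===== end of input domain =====

-- B replaces A's cascade-markers-then-filter pass over the tokens by a single scan that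
-- stops at the first '|' (objective: simpler; identical return value on every input).


-- ===== PORT A =====
-- the loop body: `for i, token in enumerate(tokens): if token == '|': if i < len(tokens)-1: tokens[i+1] = '|'`
-- (enumerate reads the mutated list, so token is the CURRENT tokens[i])
def pvStepA (ts : List String) (i : Nat) : List String :=
  if ts.getD i "" = "|" then
    if i < ts.length - 1 then ts.set (i + 1) "|" else ts
  else ts

def tokenize_usage (command : String) (usage_str : String) : List String :=
  let i_command_end := PySem.Str.find usage_str command
  let arg_str := PySem.Str.slice usage_str (some (i_command_end + (PySem.Str.len command : Int) + 1)) none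
  let tokens := PySem.Str.split₀ arg_str
  let tokens' := (List.range tokens.length).foldl pvStepA tokens
  tokens'.filter (fun t => t != "|")

-- ===== PORT B =====
-- Source B: single scan appending tokens, breaking at the first '|'
def pvTakeToBar : List String → List String
  | [] => []
  | t :: ts => if t = "|" then [] else t :: pvTakeToBar ts

def tokenize_usage_alt (command : String) (usage_str : String) : List String :=
  let i_command_end := PySem.Str.find usage_str command
  let arg_str := PySem.Str.slice usage_str (some (i_command_end + (PySem.Str.len command : Int) + 1)) none
  pvTakeToBar (PySem.Str.split₀ arg_str)

-- ===== PRECONDITION & SPEC =====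
def Spec_tokenize_usage (command : String) (usage_str : String) (out : List String) : Prop := out = tokenize_usage_alt command usage_str
instance (command : String) (usage_str : String) (out : List String) : Decidable (Spec_tokenize_usage command usage_str out) := by unfold Spec_tokenize_usage; infer_instance

-- ===== CLAIM (what is proved, stated in full; the proofs are below) =====
def Claim_equal_tokenize_usage : Prop := ∀ (command : String) (usage_str : String), Dom_tokenize_usage command usage_str → Spec_tokenize_usage command usage_str (tokenize_usage command usage_str)

-- ===== LEMMAS AND PROOFS =====

-- m = length of the bar-free prefix of ts
def pvBarIdx (ts : List String) : Nat := (ts.takeWhile (fun t => t != "|")).length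

theorem pvBarIdx_le (ts : List String) : pvBarIdx ts ≤ ts.length :=
  (List.takeWhile_prefix _).length_le

theorem pvBarIdx_facts (ts : List String) :
    (∀ j, j < pvBarIdx ts → ts.getD j "" ≠ "|") ∧
    (pvBarIdx ts < ts.length → ts.getD (pvBarIdx ts) "" = "|") ∧
    pvTakeToBar ts = ts.take (pvBarIdx ts) := by
  induction ts with
  | nil => simp [pvBarIdx, pvTakeToBar]
  | cons t ts ih =>
    by_cases ht : t = "|"
    · simp [pvBarIdx, pvTakeToBar, ht]
    · have hB : pvBarIdx (t :: ts) = pvBarIdx ts + 1 := by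
        simp [pvBarIdx, ht]
      refine ⟨?_, ?_, ?_⟩
      · intro j hj
        cases j with
        | zero => simpa using ht
        | succ j =>
          have hj' : j < pvBarIdx ts := by omega
          simpa using ih.1 j hj'
      · intro h
        rw [hB] at h ⊢
        simp only [List.length_cons] at h
        simpa using ih.2.1 (by omega)
      · rw [hB]
        simp [pvTakeToBar, ht, ih.2.2]

theorem pvGetD_set (l : List String) (i j : Nat) (a : String) :
    (l.set i a).getD j "" = if i = j ∧ i < l.length then a else l.getD j "" := by
  simp only [List.getD, List.getElem?_set]
  split_ifs with h1 h2 h3 <;> simp_all; omega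

theorem pvEq_of_getD (l1 l2 : List String) (hl : l1.length = l2.length)
    (h : ∀ i, i < l1.length → l1.getD i "" = l2.getD i "") : l1 = l2 := by
  apply List.ext_getElem hl
  intro i h1 h2
  have := h i h1
  rwa [List.getD_eq_getElem _ _ h1, List.getD_eq_getElem _ _ h2] at this

-- invariant of A's loop: after processing indices 0..k-1 the length is unchanged,
-- entries strictly between pvBarIdx ts and min (k+1) (length) are '|', the rest untouched
theorem pvLoopA_inv (ts : List String) (k : Nat) (hk : k ≤ ts.length) :
    ((List.range k).foldl pvStepA ts).length = ts.length ∧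
    ∀ j, j < ts.length →
      ((List.range k).foldl pvStepA ts).getD j "" =
        (if pvBarIdx ts < k ∧ pvBarIdx ts < j ∧ j < min (k + 1) ts.length then "|"
         else ts.getD j "") := by
  induction k with
  | zero =>
    refine ⟨rfl, fun j hj => ?_⟩
    have : ¬ (pvBarIdx ts < 0 ∧ pvBarIdx ts < j ∧ j < min 1 ts.length) := by omega
    rw [if_neg this]
    simp only [List.range_zero, List.foldl_nil]
  | succ k ih =>
    have hk' : k ≤ ts.length := Nat.le_of_succ_le hk
    have hkn : k < ts.length := hk
    obtain ⟨hlen, hget⟩ := ih hk'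
    have hfold : (List.range (k + 1)).foldl pvStepA ts
        = pvStepA ((List.range k).foldl pvStepA ts) k := by
      rw [List.range_succ, List.foldl_append]; rfl
    rw [hfold]
    generalize hs : (List.range k).foldl pvStepA ts = s at hlen hget
    set m := pvBarIdx ts with hm
    have hsk : s.getD k "" = if m < k then "|" else ts.getD k "" := by
      have hc : (m < k ∧ m < k ∧ k < min (k + 1) ts.length) ↔ m < k := by omega
      rw [hget k hkn]
      by_cases h : m < k
      · rw [if_pos (hc.mpr h), if_pos h]
      · rw [if_neg (fun hx => h (hc.mp hx)), if_neg h]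
    by_cases hkm : k < m
    · -- token at k is not '|': no change
      have hne : ts.getD k "" ≠ "|" := (pvBarIdx_facts ts).1 k hkm
      have hskne : s.getD k "" ≠ "|" := by
        rw [hsk, if_neg (by omega)]; exact hne
      have hstep : pvStepA s k = s := by unfold pvStepA; rw [if_neg hskne]
      refine ⟨by rw [hstep]; exact hlen, fun j hj => ?_⟩
      rw [hstep, hget j hj]
      have h1 : ¬ (m < k ∧ m < j ∧ j < min (k + 1) ts.length) := by omega
      have h2 : ¬ (m < k + 1 ∧ m < j ∧ j < min (k + 1 + 1) ts.length) := by omega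
      rw [if_neg h1, if_neg h2]
    · -- m ≤ k: token at k is '|'
      have hmk : m ≤ k := by omega
      have hskbar : s.getD k "" = "|" := by
        by_cases h : m < k
        · rw [hsk, if_pos h]
        · have hkm' : k = m := by omega
          rw [hsk, if_neg h, hkm']
          exact (pvBarIdx_facts ts).2.1 (by omega)
      by_cases hlast : k < s.length - 1
      · -- sets position k+1 to '|'
        have hkn1 : k + 1 < ts.length := by omega
        have hstep : pvStepA s k = s.set (k + 1) "|" := by
          unfold pvStepA; rw [if_pos hskbar, if_pos hlast]
        refine ⟨by rw [hstep, List.length_set]; exact hlen, fun j hj => ?_⟩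
        rw [hstep, pvGetD_set]
        by_cases hj1 : k + 1 = j ∧ k + 1 < s.length
        · have hyes : m < k + 1 ∧ m < j ∧ j < min (k + 1 + 1) ts.length := by omega
          rw [if_pos hj1, if_pos hyes]
        · have hjne : j ≠ k + 1 := by
            intro h; exact hj1 ⟨h.symm, by omega⟩
          rw [if_neg hj1, hget j hj]
          have hcond : (m < k ∧ m < j ∧ j < min (k + 1) ts.length) ↔
              (m < k + 1 ∧ m < j ∧ j < min (k + 1 + 1) ts.length) := by omega
          by_cases hold : m < k ∧ m < j ∧ j < min (k + 1) ts.length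
          · rw [if_pos hold, if_pos (hcond.mp hold)]
          · rw [if_neg hold, if_neg (fun hx => hold (hcond.mpr hx))]
      · -- k is the last index: no change
        have hkl : k + 1 = ts.length := by omega
        have hstep : pvStepA s k = s := by
          unfold pvStepA; rw [if_pos hskbar, if_neg hlast]
        refine ⟨by rw [hstep]; exact hlen, fun j hj => ?_⟩
        rw [hstep, hget j hj]
        have hcond : (m < k ∧ m < j ∧ j < min (k + 1) ts.length) ↔
            (m < k + 1 ∧ m < j ∧ j < min (k + 1 + 1) ts.length) := by omega
        by_cases hold : m < k ∧ m < j ∧ j < min (k + 1) ts.length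
        · rw [if_pos hold, if_pos (hcond.mp hold)]
        · rw [if_neg hold, if_neg (fun hx => hold (hcond.mpr hx))]

-- the whole token-list transformation of A equals B's scan
theorem pvLoopA_filter (ts : List String) :
    ((List.range ts.length).foldl pvStepA ts).filter (fun t => t != "|") = pvTakeToBar ts := by
  obtain ⟨hlen, hget⟩ := pvLoopA_inv ts ts.length (le_refl _)
  set m := pvBarIdx ts with hm
  have hmn : m ≤ ts.length := pvBarIdx_le ts
  generalize hs : (List.range ts.length).foldl pvStepA ts = s at hlen hget
  have hRlen : (ts.take m ++ List.replicate (ts.length - m) "|").length = ts.length := by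
    simp [List.length_take]; omega
  have hsl : s = ts.take m ++ List.replicate (ts.length - m) "|" := by
    apply pvEq_of_getD _ _ (by rw [hlen, hRlen])
    intro i hi
    have hin : i < ts.length := by rwa [hlen] at hi
    rw [hget i hin]
    by_cases him : i < m
    · have hno : ¬ (m < ts.length ∧ m < i ∧ i < min (ts.length + 1) ts.length) := by omega
      rw [if_neg hno]
      rw [List.getD_eq_getElem ts "" hin,
          List.getD_eq_getElem (ts.take m ++ List.replicate (ts.length - m) "|") "" (by rw [hRlen]; exact hin)]
      rw [List.getElem_append_left (by simp [List.length_take]; omega)]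
      simp
    · -- i ≥ m : both sides are '|'
      have hbar : (if m < ts.length ∧ m < i ∧ i < min (ts.length + 1) ts.length then "|"
          else ts.getD i "") = "|" := by
        by_cases h2 : m < i
        · rw [if_pos (by omega)]
        · have him' : i = m := by omega
          rw [him']
          split
          · rfl
          · exact (pvBarIdx_facts ts).2.1 (by omega)
      rw [hbar, List.getD_eq_getElem (ts.take m ++ List.replicate (ts.length - m) "|") "" (by rw [hRlen]; exact hin)]
      rw [List.getElem_append_right (by simp [List.length_take]; omega)]
      simp
  rw [hsl, List.filter_append]
  have h1 : (ts.take m).filter (fun t => t != "|") = ts.take m := by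
    apply List.filter_eq_self.mpr
    intro a ha
    obtain ⟨j, hj, hja⟩ := List.mem_iff_getElem.mp ha
    have hjm : j < m := by simp [List.length_take] at hj; omega
    have hne : ts.getD j "" ≠ "|" := (pvBarIdx_facts ts).1 j hjm
    rw [List.getElem_take] at hja
    subst hja
    rw [List.getD_eq_getElem ts "" (by omega)] at hne
    simpa using hne
  have h2 : (List.replicate (ts.length - m) "|").filter (fun t : String => t != "|") = [] := by
    simp
  rw [h1, h2, List.append_nil, (pvBarIdx_facts ts).2.2]

-- ===== VERDICT (by name: the statement is the Claim_ definition above) =====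
theorem tokenize_usage_spec : Claim_equal_tokenize_usage := by
  intro command usage_str _
  unfold Spec_tokenize_usage tokenize_usage tokenize_usage_alt
  exact pvLoopA_filter _
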